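-- pv_equiv track=rewrite | github.com/SEO7715/Algorithms | week06/프로그래머스_주식가격.py | solution
-- ===== SOURCE A (Python) =====
-- def solution(prices):
--     N = len(prices)
--     idx_stack = []
--     result = [0] * N
--     for curr_idx in range(N):
--         while idx_stack and prices[idx_stack[-1]] > prices[curr_idx]:
--             tmp = idx_stack.pop()
--             result[tmp] = curr_idx - tmp
--         idx_stack.append(curr_idx)
--
--     for i in idx_stack:
--         result[i] = (N -1) -i
--     return result
-- ===== SOURCE B (Python) =====
-- def solution(prices):
--     result = []
--     for i, p in enumerate(prices):
--         c = 0
--         for q in prices[i + 1:]: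
--             c += 1
--             if q < p:
--                 break
--         result.append(c)
--     return result
-- ===== Notes on version B (the rewrite author's own statement) =====
-- stated objective: simpler
-- what changed: Replaces the monotonic index-stack with a direct per-element forward scan of the suffix (count until the first strictly smaller price), so no stack and no in-place result array are maintained.
import Mathlib
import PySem

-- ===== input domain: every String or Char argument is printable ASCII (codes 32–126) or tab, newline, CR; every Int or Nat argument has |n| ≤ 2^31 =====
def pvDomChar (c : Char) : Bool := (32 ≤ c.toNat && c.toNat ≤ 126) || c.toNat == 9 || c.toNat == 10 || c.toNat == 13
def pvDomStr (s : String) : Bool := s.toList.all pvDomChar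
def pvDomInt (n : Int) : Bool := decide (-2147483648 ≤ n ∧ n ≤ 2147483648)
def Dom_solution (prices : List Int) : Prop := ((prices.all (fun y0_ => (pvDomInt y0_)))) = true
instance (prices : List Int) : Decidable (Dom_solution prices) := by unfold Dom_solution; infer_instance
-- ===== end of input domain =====

-- B replaces A's monotonic index stack with a plain per-element forward scan of the suffix (simpler; not faster).

-- ===== PORT A =====
-- inner while loop: pop indices whose price is strictly greater, recording curr - tmp.
-- indexing prices[idx]: idx is always a valid non-negative index here, so List.getD is exact.
def pvAWhile (prices : List Int) (curr : Nat) : List Nat → List Int → (List Nat × List Int)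
  | [], result => ([], result)
  | t :: rest, result =>
    if prices.getD t 0 > prices.getD curr 0 then
      pvAWhile prices curr rest (result.set t ((curr : Int) - (t : Int)))
    else (t :: rest, result)

def solution (prices : List Int) : List Int :=
  let N := prices.length
  let st := (List.range N).foldl
    (fun st curr =>
      let p := pvAWhile prices curr st.1 st.2
      (curr :: p.1, p.2))
    ([], List.replicate N 0)
  -- Python iterates the remaining stack bottom-to-top; our head-is-top list reversed.
  (st.1.reverse).foldl (fun r i => r.set i ((N : Int) - 1 - (i : Nat))) st.2

-- ===== PORT B =====
-- inner for loop of Source B: count steps until the first strictly smaller price (whole suffix length if none).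
def pvWalk (p : Int) : List Int → Int
  | [] => 0
  | q :: qs => if q < p then 1 else 1 + pvWalk p qs

def solution_alt : List Int → List Int
  | [] => []
  | p :: rest => pvWalk p rest :: solution_alt rest

-- ===== PRECONDITION & SPEC =====
def Spec_solution (prices : List Int) (out : List Int) : Prop := out = solution_alt prices
instance (prices : List Int) (out : List Int) : Decidable (Spec_solution prices out) := by unfold Spec_solution; infer_instance

-- ===== CLAIM (what is proved, stated in full; the proofs are below) =====
def Claim_equal_solution : Prop := ∀ (prices : List Int), Dom_solution prices → Spec_solution prices (solution prices)

-- ===== LEMMAS AND PROOFS =====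

-- the final value for index i: days until the first strictly lower price, else distance to the end
def pvF (prices : List Int) (i : Nat) : Int := pvWalk (prices.getD i 0) (prices.drop (i + 1))

theorem pvAlt_eq_map (l : List Int) :
    solution_alt l = (List.range l.length).map (fun i => pvF l i) := by
  induction l with
  | nil => rfl
  | cons p rest ih =>
    have h0 : pvF (p :: rest) 0 = pvWalk p rest := by simp [pvF]
    have hs : ∀ i : Nat, pvF (p :: rest) (i + 1) = pvF rest i := by
      intro i; simp [pvF]
    simp [solution_alt, List.range_succ_eq_map, List.map_map, h0, hs, Function.comp, ih]

theorem pvWalk_first (l : List Int) (p : Int) (k : Nat) (hk : k < l.length)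
    (hlt : l.getD k 0 < p) (hmin : ∀ j, j < k → ¬ (l.getD j 0 < p)) :
    pvWalk p l = (k : Int) + 1 := by
  induction l generalizing k with
  | nil => simp at hk
  | cons q qs ih =>
    cases k with
    | zero =>
      simp only [List.getD_cons_zero] at hlt
      simp [pvWalk, hlt]
    | succ k =>
      have hq : ¬ (q < p) := by
        have := hmin 0 (Nat.succ_pos _)
        simpa using this
      simp only [List.getD_cons_succ] at hlt
      have := ih k (by simpa using hk) hlt (fun j hj => by
        have := hmin (j + 1) (by omega)
        simpa using this)
      simp [pvWalk, hq, this]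
      ring

theorem pvWalk_none (l : List Int) (p : Int)
    (hmin : ∀ j, j < l.length → ¬ (l.getD j 0 < p)) :
    pvWalk p l = (l.length : Int) := by
  induction l with
  | nil => rfl
  | cons q qs ih =>
    have hq : ¬ (q < p) := by have := hmin 0 (by simp); simpa using this
    have := ih (fun j hj => by
      have := hmin (j + 1) (by simpa using Nat.succ_lt_succ hj)
      simpa using this)
    simp [pvWalk, hq, this]
    ring

theorem pvGetD_drop (l : List Int) (m j : Nat) :
    (l.drop m).getD j 0 = l.getD (m + j) 0 := by
  simp [List.getD_eq_getElem?_getD, List.getElem?_drop]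

theorem pvF_of_first (prices : List Int) (i cur : Nat) (hic : i < cur)
    (hc : cur < prices.length)
    (hdrop : prices.getD cur 0 < prices.getD i 0)
    (hmin : ∀ j, i < j → j < cur → ¬ (prices.getD j 0 < prices.getD i 0)) :
    pvF prices i = (cur : Int) - (i : Nat) := by
  unfold pvF
  have hlen : cur - i - 1 < (prices.drop (i + 1)).length := by
    simp [List.length_drop]; omega
  have h1 : (prices.drop (i + 1)).getD (cur - i - 1) 0 = prices.getD cur 0 := by
    rw [pvGetD_drop]; congr 1; omega
  have := pvWalk_first (prices.drop (i + 1)) (prices.getD i 0) (cur - i - 1) hlen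
    (by rw [h1]; exact hdrop)
    (fun j hj => by
      rw [pvGetD_drop]
      exact hmin (i + 1 + j) (by omega) (by omega))
  rw [this]
  have : ((cur - i - 1 : Nat) : Int) = (cur : Int) - i - 1 := by omega
  rw [this]; ring

theorem pvF_of_none (prices : List Int) (i : Nat) (hi : i < prices.length)
    (hmin : ∀ j, i < j → j < prices.length → ¬ (prices.getD j 0 < prices.getD i 0)) :
    pvF prices i = (prices.length : Int) - 1 - (i : Nat) := by
  unfold pvF
  rw [pvWalk_none _ _ (fun j hj => by
    rw [pvGetD_drop]
    have hj' : j < prices.length - (i + 1) := by simpa [List.length_drop] using hj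
    exact hmin (i + 1 + j) (by omega) (by omega))]
  simp [List.length_drop]
  omega

theorem pvFoldlSet_length (l : List Nat) (g : Nat → Int) (r : List Int) :
    (l.foldl (fun r t => r.set t (g t)) r).length = r.length := by
  induction l generalizing r with
  | nil => rfl
  | cons t rest ih => simp [List.foldl_cons, ih]

theorem pvGetD_set (r : List Int) (t k : Nat) (v : Int) (ht : t < r.length) :
    (r.set t v).getD k 0 = if t = k then v else r.getD k 0 := by
  simp only [List.getD_eq_getElem?_getD, List.getElem?_set]
  split_ifs with h
  · simp
  · rfl

theorem pvFoldlSet_getD (l : List Nat) (g : Nat → Int) (r : List Int) (k : Nat)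
    (hb : ∀ t ∈ l, t < r.length) (hnd : l.Nodup) :
    (l.foldl (fun r t => r.set t (g t)) r).getD k 0
      = if k ∈ l then g k else r.getD k 0 := by
  induction l generalizing r with
  | nil => simp
  | cons t rest ih =>
    have hnd' := hnd
    simp only [List.nodup_cons] at hnd'
    have ht : t < r.length := hb t (by simp)
    rw [List.foldl_cons, ih (r.set t (g t)) (fun x hx => by
        rw [List.length_set]; exact hb x (by simp [hx])) hnd'.2]
    by_cases hk : k ∈ rest
    · simp [hk]
    · by_cases hkt : k = t
      · subst hkt
        rw [if_neg hk, pvGetD_set r k k (g k) ht, if_pos rfl, if_pos (by simp)]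
      · have hnm : ¬ k ∈ t :: rest := by
          simp only [List.mem_cons, not_or]; exact ⟨hkt, hk⟩
        rw [if_neg hk, if_neg hnm, pvGetD_set r t k _ ht, if_neg (fun h => hkt h.symm)]

theorem pvAWhile_eq (prices : List Int) (curr : Nat) (s : List Nat) (r : List Int) :
    pvAWhile prices curr s r =
      (s.dropWhile (fun t => decide (prices.getD curr 0 < prices.getD t 0)),
       (s.takeWhile (fun t => decide (prices.getD curr 0 < prices.getD t 0))).foldl
         (fun r t => r.set t ((curr : Int) - (t : Nat))) r) := by
  induction s generalizing r with
  | nil => rfl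
  | cons t rest ih =>
    simp only [pvAWhile]
    by_cases h : prices.getD curr 0 < prices.getD t 0
    · rw [if_pos (show prices.getD t 0 > prices.getD curr 0 from h),
        List.dropWhile_cons_of_pos (by simpa using h),
        List.takeWhile_cons_of_pos (by simpa using h), List.foldl_cons]
      exact ih _
    · rw [if_neg (show ¬ prices.getD t 0 > prices.getD curr 0 from h),
        List.dropWhile_cons_of_neg (by simpa using h),
        List.takeWhile_cons_of_neg (by simpa using h), List.foldl_nil]

theorem pvMem_dropWhile (pc : Int) (pg : Nat → Int) (s : List Nat)
    (hp : s.Pairwise (fun a b => pg b ≤ pg a)) (i : Nat) :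
    i ∈ s.dropWhile (fun t => decide (pc < pg t)) ↔ i ∈ s ∧ pg i ≤ pc := by
  induction s with
  | nil => simp
  | cons t rest ih =>
    rw [List.pairwise_cons] at hp
    by_cases h : pc < pg t
    · rw [List.dropWhile_cons_of_pos (by simpa using h), ih hp.2]
      constructor
      · rintro ⟨hi, hle⟩; exact ⟨by simp [hi], hle⟩
      · rintro ⟨hi, hle⟩
        rcases List.mem_cons.mp hi with rfl | hi
        · omega
        · exact ⟨hi, hle⟩
    · rw [List.dropWhile_cons_of_neg (by simpa using h)]
      constructor
      · intro hi
        refine ⟨hi, ?_⟩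
        rcases List.mem_cons.mp hi with rfl | hi
        · omega
        · have := hp.1 i hi; omega
      · exact fun hi => hi.1

-- loop invariant for A's outer fold, after processing indices < c
def pvInv (prices : List Int) (c : Nat) (s : List Nat) (r : List Int) : Prop :=
  r.length = prices.length ∧
  (∀ i, i ∈ s ↔ i < c ∧ ∀ j, i < j → j < c → ¬ (prices.getD j 0 < prices.getD i 0)) ∧
  s.Pairwise (fun a b => b < a ∧ prices.getD b 0 ≤ prices.getD a 0) ∧
  (∀ k, r.getD k 0 = if k < c ∧ k ∉ s then pvF prices k else 0)

theorem pvInv_step (prices : List Int) (c : Nat) (s : List Nat) (r : List Int)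
    (hInv : pvInv prices c s r) (hc : c < prices.length) :
    pvInv prices (c + 1)
      (c :: s.dropWhile (fun t => decide (prices.getD c 0 < prices.getD t 0)))
      ((s.takeWhile (fun t => decide (prices.getD c 0 < prices.getD t 0))).foldl
         (fun r t => r.set t ((c : Int) - (t : Nat))) r) := by
  obtain ⟨hlen, hmem, hpw, hres⟩ := hInv
  set P : Nat → Bool := fun t => decide (prices.getD c 0 < prices.getD t 0) with hP
  have hsub_take : (s.takeWhile P).Sublist s := List.takeWhile_sublist _
  have hsub_drop : (s.dropWhile P).Sublist s := List.dropWhile_sublist _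
  have hnd : s.Nodup := (List.pairwise_and_iff.mp hpw).1.nodup
  have hlt_c : ∀ i ∈ s, i < c := fun i hi => ((hmem i).mp hi).1
  have hdropmem : ∀ i, i ∈ s.dropWhile P ↔ i ∈ s ∧ prices.getD i 0 ≤ prices.getD c 0 := by
    intro i
    exact pvMem_dropWhile (prices.getD c 0) (fun t => prices.getD t 0) s
      ((List.pairwise_and_iff.mp hpw).2) i
  have htakemem : ∀ i, i ∈ s.takeWhile P ↔ i ∈ s ∧ prices.getD c 0 < prices.getD i 0 := by
    intro i
    constructor
    · intro h
      have h1 : i ∈ s := hsub_take.mem h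
      have h2 : P i = true := List.mem_takeWhile_imp h
      exact ⟨h1, by simpa [hP] using h2⟩
    · rintro ⟨h1, h2⟩
      have : i ∈ s.takeWhile P ++ s.dropWhile P := by
        rw [List.takeWhile_append_dropWhile]; exact h1
      rcases List.mem_append.mp this with h | h
      · exact h
      · have := (hdropmem i).mp h; omega
  -- value written to each popped index is its final value
  have hFtake : ∀ k ∈ s.takeWhile P, pvF prices k = (c : Int) - (k : Nat) := by
    intro k hk
    obtain ⟨hks, hkp⟩ := (htakemem k).mp hk
    exact pvF_of_first prices k c (hlt_c k hks) hc hkp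
      (fun j hj1 hj2 => (((hmem k).mp hks).2) j hj1 hj2)
  have hres' : ∀ k,
      ((s.takeWhile P).foldl (fun r t => r.set t ((c : Int) - (t : Nat))) r).getD k 0
        = if k ∈ s.takeWhile P then (c : Int) - (k : Nat) else r.getD k 0 := by
    intro k
    exact pvFoldlSet_getD _ _ r k
      (fun t ht => by rw [hlen]; exact Nat.lt_trans (hlt_c t (hsub_take.mem ht)) hc)
      (hnd.sublist hsub_take)
  refine ⟨?_, ?_, ?_, ?_⟩
  · rw [pvFoldlSet_length]; exact hlen
  · intro i
    simp only [List.mem_cons]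
    constructor
    · rintro (rfl | hi)
      · exact ⟨by omega, fun j hj1 hj2 => by omega⟩
      · obtain ⟨his, hile⟩ := (hdropmem i).mp hi
        obtain ⟨hic, hmin⟩ := (hmem i).mp his
        refine ⟨by omega, fun j hj1 hj2 => ?_⟩
        by_cases hjc : j = c
        · subst hjc; omega
        · exact hmin j hj1 (by omega)
    · rintro ⟨hic, hmin⟩
      by_cases hieq : i = c
      · exact Or.inl hieq
      · right
        have hic' : i < c := by omega
        have his : i ∈ s := (hmem i).mpr ⟨hic', fun j h1 h2 => hmin j h1 (by omega)⟩
        exact (hdropmem i).mpr ⟨his, by have := hmin c hic' (by omega); omega⟩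
  · rw [List.pairwise_cons]
    refine ⟨fun b hb => ?_, ?_⟩
    · obtain ⟨hbs, hble⟩ := (hdropmem b).mp hb
      exact ⟨hlt_c b hbs, hble⟩
    · exact hpw.sublist hsub_drop
  · intro k
    rw [hres' k]
    by_cases hk : k ∈ s.takeWhile P
    · rw [if_pos hk, if_pos, hFtake k hk]
      obtain ⟨hks, hkp⟩ := (htakemem k).mp hk
      refine ⟨by have := hlt_c k hks; omega, ?_⟩
      simp only [List.mem_cons, not_or]
      refine ⟨by have := hlt_c k hks; omega, fun hkd => ?_⟩
      have := (hdropmem k).mp hkd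
      omega
    · rw [if_neg hk, hres k]
      by_cases hks : k ∈ s
      · have hkd : k ∈ s.dropWhile P := by
          have hksplit : k ∈ s.takeWhile P ++ s.dropWhile P := by
            rw [List.takeWhile_append_dropWhile]; exact hks
          rcases List.mem_append.mp hksplit with h | h
          · exact absurd h hk
          · exact h
        rw [if_neg (fun hcon => hcon.2 hks),
          if_neg (fun hcon => hcon.2 (List.mem_cons_of_mem _ hkd))]
      · by_cases hkc : k = c
        · subst hkc
          rw [if_neg (fun hcon => absurd hcon.1 (lt_irrefl _)),
            if_neg (fun hcon => hcon.2 (by simp))]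
        · have hknd : k ∉ c :: s.dropWhile P := by
            simp only [List.mem_cons, not_or]
            exact ⟨hkc, fun h => hks (hsub_drop.mem h)⟩
          by_cases hkcc : k < c
          · rw [if_pos ⟨hkcc, hks⟩, if_pos ⟨by omega, hknd⟩]
          · rw [if_neg (fun hcon => hkcc hcon.1),
              if_neg (fun hcon => absurd hcon.1 (by omega))]

theorem pvInv_range (prices : List Int) (c : Nat) (hc : c ≤ prices.length) :
    pvInv prices c
      (((List.range c).foldl
        (fun st curr =>
          let p := pvAWhile prices curr st.1 st.2
          (curr :: p.1, p.2))
        (([] : List Nat), List.replicate prices.length 0)).1)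
      (((List.range c).foldl
        (fun st curr =>
          let p := pvAWhile prices curr st.1 st.2
          (curr :: p.1, p.2))
        (([] : List Nat), List.replicate prices.length 0)).2) := by
  induction c with
  | zero =>
    refine ⟨by simp, by simp, by simp, fun k => by simp [List.getD_eq_getElem?_getD]⟩
  | succ c ih =>
    have hc' : c ≤ prices.length := by omega
    have hcc : c < prices.length := by omega
    rw [List.range_succ, List.foldl_append, List.foldl_cons, List.foldl_nil]
    have hstep := pvInv_step prices c _ _ (ih hc') hcc
    rw [pvAWhile_eq]
    exact hstep

theorem solution_eq_map (prices : List Int) :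
    solution prices = (List.range prices.length).map (fun i => pvF prices i) := by
  have key : ∀ (s : List Nat) (r : List Int),
      r.length = prices.length →
      (∀ i, i ∈ s ↔ i < prices.length ∧
        ∀ j, i < j → j < prices.length → ¬ (prices.getD j 0 < prices.getD i 0)) →
      s.Pairwise (fun a b => b < a ∧ prices.getD b 0 ≤ prices.getD a 0) →
      (∀ k, r.getD k 0 = if k < prices.length ∧ k ∉ s then pvF prices k else 0) →
      (s.reverse).foldl (fun r i => r.set i ((prices.length : Int) - 1 - (i : Nat))) r
        = (List.range prices.length).map (fun i => pvF prices i) := by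
    intro s r hlen hmem hpw hres
    have hnd : s.Nodup := (List.pairwise_and_iff.mp hpw).1.nodup
    have hlt : ∀ i ∈ s, i < prices.length := fun i hi => ((hmem i).mp hi).1
    have hfinal : ∀ k,
        ((s.reverse).foldl (fun r i => r.set i ((prices.length : Int) - 1 - (i : Nat))) r).getD k 0
          = if k ∈ s.reverse then (prices.length : Int) - 1 - (k : Nat) else r.getD k 0 :=
      fun k => pvFoldlSet_getD _ _ _ k
        (fun t ht => by rw [hlen]; exact hlt t (List.mem_reverse.mp ht))
        (List.nodup_reverse.mpr hnd)
    have hflen :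
        ((s.reverse).foldl (fun r i => r.set i ((prices.length : Int) - 1 - (i : Nat))) r).length
          = prices.length := by rw [pvFoldlSet_length]; exact hlen
    apply List.ext_getElem
    · rw [hflen, List.length_map, List.length_range]
    · intro k h1 h2
      have hkN : k < prices.length := by rw [hflen] at h1; exact h1
      have hgd : ∀ (l : List Int) (hk : k < l.length), l[k] = l.getD k 0 := by
        intro l hk
        simp [List.getD_eq_getElem?_getD, List.getElem?_eq_getElem hk]
      rw [hgd _ h1, hgd _ h2, hfinal k]
      have hrange : ((List.range prices.length).map (fun i => pvF prices i)).getD k 0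
          = pvF prices k := by
        simp [List.getD_eq_getElem?_getD, hkN]
      rw [hrange]
      by_cases hk : k ∈ s
      · rw [if_pos (List.mem_reverse.mpr hk)]
        rw [pvF_of_none prices k hkN (fun j ha hb => ((hmem k).mp hk).2 j ha hb)]
      · rw [if_neg (fun h => hk (List.mem_reverse.mp h)), hres k, if_pos ⟨hkN, hk⟩]
  obtain ⟨hlen, hmem, hpw, hres⟩ := pvInv_range prices prices.length (le_refl _)
  exact key _ _ hlen hmem hpw hres

-- ===== VERDICT (by name: the statement is the Claim_ definition above) =====
theorem solution_spec : Claim_equal_solution := by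
  intro prices _
  unfold Spec_solution
  rw [solution_eq_map, pvAlt_eq_map]
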